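-- pv_equiv track=rewrite | github.com/rebryant/pgpbs-artifact | experimental-results/code/grab_clauses_cdcl.py | nthNumber
-- ===== SOURCE A (Python) =====
-- def nthNumber(fields, n):
--     count  = 0
--     for field in fields:
--         try:
--             val = int(field)
--             count += 1
--             if count == n:
--                 return val
--         except:
--             continue
--     return 0
-- ===== SOURCE B (Python) =====
-- def nthNumber(fields, n):
--     vals = []
--     for field in fields:
--         try:
--             vals.append(int(field))
--         except:
--             pass
--     if 1 <= n <= len(vals):
--         return vals[n - 1]
--     return 0
-- ===== Notes on version B (the rewrite author's own statement) =====
-- stated objective: simpler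
-- what changed: Replaces A's interleaved count-and-early-return scan with a two-phase structure: first collect all parseable integers into a list, then index it (vals[n-1] if 1 <= n <= len(vals), else 0).
import Mathlib
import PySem

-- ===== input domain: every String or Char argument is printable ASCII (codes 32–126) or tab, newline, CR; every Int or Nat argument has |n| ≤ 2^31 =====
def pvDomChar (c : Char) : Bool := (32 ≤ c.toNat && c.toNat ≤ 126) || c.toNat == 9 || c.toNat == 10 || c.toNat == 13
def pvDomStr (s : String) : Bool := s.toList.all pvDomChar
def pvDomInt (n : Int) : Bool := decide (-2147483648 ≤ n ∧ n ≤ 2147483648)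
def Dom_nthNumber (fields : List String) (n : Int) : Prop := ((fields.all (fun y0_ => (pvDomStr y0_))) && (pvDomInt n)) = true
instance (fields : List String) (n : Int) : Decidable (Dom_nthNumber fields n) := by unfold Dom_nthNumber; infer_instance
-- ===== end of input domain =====

-- B replaces A's interleaved count-and-early-return scan with collect-then-index; objective: simpler.

-- ===== PORT A =====
-- A's loop: carry the running count; on a parseable field bump it and return when it hits n.
def nthNumberLoop (fields : List String) (n : Int) (count : Int) : Int :=
  match fields with
  | [] => 0
  | f :: rest =>
    match PySem.Int.ofStr? f with
    | none => nthNumberLoop rest n count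
    | some v => if count + 1 = n then v else nthNumberLoop rest n (count + 1)

def nthNumber (fields : List String) (n : Int) : Int := nthNumberLoop fields n 0

-- ===== PORT B =====
-- collect all parseable integers, then index the table
def nthNumber_alt (fields : List String) (n : Int) : Int :=
  let vals := fields.filterMap PySem.Int.ofStr?
  if 1 ≤ n ∧ n ≤ vals.length then vals.getD (n - 1).toNat 0 else 0

-- ===== PRECONDITION & SPEC =====
def Spec_nthNumber (fields : List String) (n : Int) (out : Int) : Prop := out = nthNumber_alt fields n
instance (fields : List String) (n : Int) (out : Int) : Decidable (Spec_nthNumber fields n out) := by unfold Spec_nthNumber; infer_instance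

-- ===== CLAIM (what is proved, stated in full; the proofs are below) =====
def Claim_equal_nthNumber : Prop := ∀ (fields : List String) (n : Int), Dom_nthNumber fields n → Spec_nthNumber fields n (nthNumber fields n)

-- ===== LEMMAS AND PROOFS =====
-- the table-indexing body of B, as a function of the already-collected values
def nthTable (vals : List Int) (m : Int) : Int :=
  if 1 ≤ m ∧ m ≤ vals.length then vals.getD (m - 1).toNat 0 else 0

-- loop invariant: A's loop at running count `count` computes B's table lookup at index n - count
theorem nthNumberLoop_eq (fields : List String) (n count : Int) :
    nthNumberLoop fields n count = nthTable (fields.filterMap PySem.Int.ofStr?) (n - count) := by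
  induction fields generalizing count with
  | nil =>
    simp [nthNumberLoop, nthTable]
  | cons f rest ih =>
    simp only [nthNumberLoop, List.filterMap_cons]
    cases h : PySem.Int.ofStr? f with
    | none => simpa using ih count
    | some v =>
      by_cases hc : count + 1 = n
      · simp only [if_pos hc, nthTable]
        have h1 : n - count = 1 := by omega
        rw [h1]
        simp
      · simp only [if_neg hc]
        rw [ih (count + 1)]
        unfold nthTable
        by_cases h1 : 1 ≤ n - (count + 1) ∧ n - (count + 1) ≤ (rest.filterMap PySem.Int.ofStr?).length
        · rw [if_pos h1, if_pos (⟨by omega, by simp only [List.length_cons]; push_cast; omega⟩ :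
            1 ≤ n - count ∧ n - count ≤ ((v :: rest.filterMap PySem.Int.ofStr?).length : Int))]
          have h2 : (n - count - 1).toNat = (n - (count + 1) - 1).toNat + 1 := by omega
          rw [h2]
          simp
        · rw [if_neg h1, if_neg]
          simp only [List.length_cons]
          push_cast
          omega

-- ===== VERDICT (by name: the statement is the Claim_ definition above) =====
theorem nthNumber_spec : Claim_equal_nthNumber := by
  intro fields n _
  show nthNumber fields n = nthNumber_alt fields n
  rw [nthNumber, nthNumberLoop_eq]
  simp [nthTable, nthNumber_alt]
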